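-- pv_equiv track=rewrite | github.com/MrBrantCode/unitest_baseline | mut_generate/mist_train_taco/taco_8776/solution.py | calculate_max_joy
-- ===== SOURCE A (Python) =====
-- def calculate_max_joy(N, V):
--     count = 0
--     ans = 0
--     s = -1
--     while count != N:
--         ans -= s
--         s -= 1
--         count += 1
--     return sum(V) - ans
-- ===== SOURCE B (Python) =====
-- def calculate_max_joy(N, V):
--     return sum(V) - N * (N + 1) // 2
-- ===== Notes on version B (the rewrite author's own statement) =====
-- stated objective: faster
-- what changed: Replaces the O(N) counting loop that accumulates 1+2+...+N with the closed-form triangular number N*(N+1)//2.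
import Mathlib
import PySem

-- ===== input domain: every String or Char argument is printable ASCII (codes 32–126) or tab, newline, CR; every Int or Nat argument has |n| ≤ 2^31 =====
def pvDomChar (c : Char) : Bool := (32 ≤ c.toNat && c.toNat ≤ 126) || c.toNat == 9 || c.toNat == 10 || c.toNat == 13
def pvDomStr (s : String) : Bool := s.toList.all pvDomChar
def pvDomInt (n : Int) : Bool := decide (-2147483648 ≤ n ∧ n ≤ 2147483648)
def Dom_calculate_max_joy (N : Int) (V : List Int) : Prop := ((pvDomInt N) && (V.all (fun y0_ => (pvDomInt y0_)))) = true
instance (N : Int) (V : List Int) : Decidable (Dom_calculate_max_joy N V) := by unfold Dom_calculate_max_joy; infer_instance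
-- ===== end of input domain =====

-- ===== PORT A =====
-- B replaces A's O(N) counting loop with the closed-form triangular number: faster (asymptotic).
-- while-loop of A: runs N times (count 0..N-1), each step ans -= s; s -= 1, starting s = -1
def pvLoopA : Nat → Int → Int → Int
  | 0, ans, _ => ans
  | k + 1, ans, s => pvLoopA k (ans - s) (s - 1)

def calculate_max_joy (N : Int) (V : List Int) : Int :=
  (V.foldl (· + ·) 0) - pvLoopA N.toNat 0 (-1)

-- ===== PORT B =====
def calculate_max_joy_alt (N : Int) (V : List Int) : Int :=
  (V.foldl (· + ·) 0) - PySem.Int.floordiv (N * (N + 1)) 2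

-- ===== PRECONDITION & SPEC =====
-- Pre_ excludes N < 0, on which A's 'while count != N' loop never terminates (count counts up from 0).
def Pre_calculate_max_joy (N : Int) (V : List Int) : Prop := 0 ≤ N
instance (N : Int) (V : List Int) : Decidable (Pre_calculate_max_joy N V) := by unfold Pre_calculate_max_joy; infer_instance
def pvWitness_calculate_max_joy : Int × List Int := (3, [1, 2, 3])
def Spec_calculate_max_joy (N : Int) (V : List Int) (out : Int) : Prop := out = calculate_max_joy_alt N V
instance (N : Int) (V : List Int) (out : Int) : Decidable (Spec_calculate_max_joy N V out) := by unfold Spec_calculate_max_joy; infer_instance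

-- ===== CLAIM (what is proved, stated in full; the proofs are below) =====
def Claim_equal_calculate_max_joy : Prop := ∀ (N : Int) (V : List Int), Dom_calculate_max_joy N V → Pre_calculate_max_joy N V → Spec_calculate_max_joy N V (calculate_max_joy N V)

-- ===== LEMMAS AND PROOFS =====
lemma pvLoopA_double (k : Nat) : ∀ (ans s : Int), 2 * pvLoopA k ans s = 2 * ans - 2 * k * s + k * (k - 1) := by
  induction k with
  | zero => intro ans s; simp [pvLoopA]
  | succ n ih =>
    intro ans s
    rw [pvLoopA, ih]
    push_cast
    ring

lemma pvLoopA_closed (n : Nat) : pvLoopA n 0 (-1) = PySem.Int.floordiv ((n : Int) * ((n : Int) + 1)) 2 := by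
  have h2 : 2 * pvLoopA n 0 (-1) = (n : Int) * ((n : Int) + 1) := by
    rw [pvLoopA_double]; push_cast; ring
  rw [PySem.Int.floordiv_eq_ediv_of_pos (by omega)]
  omega

-- ===== VERDICT (by name: the statement is the Claim_ definition above) =====
theorem calculate_max_joy_spec : Claim_equal_calculate_max_joy := by
  intro N V _ hpre
  unfold Spec_calculate_max_joy calculate_max_joy calculate_max_joy_alt
  rw [pvLoopA_closed, Int.toNat_of_nonneg hpre]
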